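-- pv_equiv track=rewrite | github.com/hejiheji001/MedicalFapiaoOCR | run.py | build_page_ranges
-- ===== SOURCE A (Python) =====
-- def build_page_ranges(pages_sorted):
--     """Build a human-readable page range string.
--
--     Examples:
--         [1]           -> '1'
--         [1,2,3]       -> '1-3'
--         [1,2,5,6,7]   -> '1-2,5-7'
--     """
--     if not pages_sorted:
--         return ''
--     if len(pages_sorted) == 1:
--         return str(pages_sorted[0])
--
--     ranges = []
--     start = end = pages_sorted[0]
--     for pg in pages_sorted[1:]:
--         if pg == end + 1:
--             end = pg
--         else:
--             ranges.append((start, end))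
--             start = end = pg
--     ranges.append((start, end))
--
--     return ','.join(
--         str(s) if s == e else f'{s}-{e}'
--         for s, e in ranges
--     )
-- ===== SOURCE B (Python) =====
-- from itertools import groupby
--
--
-- def build_page_ranges(pages_sorted):
--     parts = []
--     for _, grp in groupby(enumerate(pages_sorted), key=lambda t: t[0] - t[1]):
--         g = list(grp)
--         s, e = g[0][1], g[-1][1]
--         parts.append(str(s) if s == e else f'{s}-{e}')
--     return ','.join(parts)
-- ===== Notes on version B (the rewrite author's own statement) =====
-- stated objective: idiomatic
-- what changed: Replaces the start/end accumulator loop with itertools.groupby over enumerate keyed by index-minus-value, so consecutive runs fall out of a constant key and no boundary-tracking state or empty/singleton special cases are needed.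
import Mathlib
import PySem

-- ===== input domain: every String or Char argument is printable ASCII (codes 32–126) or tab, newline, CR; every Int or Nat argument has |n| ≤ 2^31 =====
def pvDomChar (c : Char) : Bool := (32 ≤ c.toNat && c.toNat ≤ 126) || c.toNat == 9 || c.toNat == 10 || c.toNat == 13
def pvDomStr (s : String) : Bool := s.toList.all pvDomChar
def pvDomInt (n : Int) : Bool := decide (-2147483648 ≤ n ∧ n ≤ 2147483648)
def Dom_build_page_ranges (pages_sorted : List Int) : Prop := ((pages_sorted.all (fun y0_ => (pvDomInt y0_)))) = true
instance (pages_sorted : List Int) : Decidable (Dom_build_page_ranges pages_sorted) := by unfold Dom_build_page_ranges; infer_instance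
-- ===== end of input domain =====

-- B replaces A's start/end accumulator loop by groupby over enumerate keyed by index-minus-value (idiomatic; same O(n) cost).


-- ===== PORT A =====
-- A's pair formatter: str(s) if s == e else f'{s}-{e}'
def pvFmtPair (se : Int × Int) : String :=
  if se.1 = se.2 then PySem.Int.toStr se.1
  else PySem.Int.toStr se.1 ++ "-" ++ PySem.Int.toStr se.2

def build_page_ranges (pages_sorted : List Int) : String :=
  match pages_sorted with
  | [] => ""
  | p0 :: rest =>
    if rest = [] then PySem.Int.toStr p0           -- len == 1: str(pages_sorted[0])
    else
      -- for pg in pages_sorted[1:] maintaining (ranges, start, end)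
      let st := rest.foldl
        (fun (acc : List (Int × Int) × Int × Int) pg =>
          if pg = acc.2.2 + 1 then (acc.1, acc.2.1, pg)
          else (acc.1 ++ [(acc.2.1, acc.2.2)], pg, pg))
        ([], p0, p0)
      let ranges := st.1 ++ [(st.2.1, st.2.2)]
      PySem.Str.join "," (ranges.map pvFmtPair)

-- ===== PORT B =====
-- key=lambda t: t[0] - t[1]
def pvKey (t : Int × Int) : Int := t.1 - t.2

-- groupby helper: given the current element x and the remaining list, return
-- (rest of x's group, the later groups); faithful adjacent grouping by pvKey.
def pvGb (x : Int × Int) : List (Int × Int) → List (Int × Int) × List (List (Int × Int))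
  | [] => ([], [])
  | y :: ys =>
    let r := pvGb y ys
    if pvKey x = pvKey y then (y :: r.1, r.2) else ([], (y :: r.1) :: r.2)

def pvGroups : List (Int × Int) → List (List (Int × Int))
  | [] => []
  | x :: xs => (x :: (pvGb x xs).1) :: (pvGb x xs).2

-- g[0][1], g[-1][1]; str(s) if s == e else f'{s}-{e}'
def pvFmtGroup (g : List (Int × Int)) : String :=
  let s := (g.headI).2
  let e := (g.getLastD (0, 0)).2
  if s = e then PySem.Int.toStr s else PySem.Int.toStr s ++ "-" ++ PySem.Int.toStr e

def build_page_ranges_alt (pages_sorted : List Int) : String :=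
  PySem.Str.join "," ((pvGroups (PySem.List.enumerate pages_sorted)).map pvFmtGroup)

-- ===== PRECONDITION & SPEC =====
def Spec_build_page_ranges (pages_sorted : List Int) (out : String) : Prop := out = build_page_ranges_alt pages_sorted
instance (pages_sorted : List Int) (out : String) : Decidable (Spec_build_page_ranges pages_sorted out) := by unfold Spec_build_page_ranges; infer_instance

-- ===== CLAIM (what is proved, stated in full; the proofs are below) =====
def Claim_equal_build_page_ranges : Prop := ∀ (pages_sorted : List Int), Dom_build_page_ranges pages_sorted → Spec_build_page_ranges pages_sorted (build_page_ranges pages_sorted)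

-- ===== LEMMAS AND PROOFS =====

-- Common reference: from current run-end e, the end of the current run and the later (start,end) pairs.
def pvSeg0 (e : Int) : List Int → Int × List (Int × Int)
  | [] => (e, [])
  | p :: rest =>
    if p = e + 1 then pvSeg0 p rest
    else ((e, ((p, (pvSeg0 p rest).1) :: (pvSeg0 p rest).2)) : Int × List (Int × Int))

-- A's fold computes pvSeg0.
lemma foldA_seg (l : List Int) : ∀ (acc : List (Int × Int)) (s e : Int),
    (let st := l.foldl
      (fun (acc : List (Int × Int) × Int × Int) pg =>
        if pg = acc.2.2 + 1 then (acc.1, acc.2.1, pg)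
        else (acc.1 ++ [(acc.2.1, acc.2.2)], pg, pg))
      (acc, s, e)
    st.1 ++ [(st.2.1, st.2.2)]) = acc ++ (s, (pvSeg0 e l).1) :: (pvSeg0 e l).2 := by
  induction l with
  | nil => intro acc s e; simp [pvSeg0]
  | cons p rest ih =>
    intro acc s e
    simp only [List.foldl_cons, pvSeg0]
    by_cases h : p = e + 1
    · simp only [h, if_pos]
      exact ih acc s (e + 1)
    · simp only [if_neg h]
      rw [ih (acc ++ [(s, e)]) p p]
      simp

-- B's grouping computes pvSeg0: last of current group and formatted later groups.
lemma gb_seg (rest : List Int) : ∀ (k v : Int),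
    ((((k, v) :: (pvGb (k, v) (PySem.List.enumerate rest (k + 1))).1).getLastD (0, 0)).2
        = (pvSeg0 v rest).1)
    ∧ ((pvGb (k, v) (PySem.List.enumerate rest (k + 1))).2).map pvFmtGroup
        = ((pvSeg0 v rest).2).map pvFmtPair := by
  induction rest with
  | nil => intro k v; simp [PySem.List.enumerate_nil, pvGb, pvSeg0]
  | cons p rest ih =>
    intro k v
    rw [PySem.List.enumerate_cons]
    simp only [pvGb, pvSeg0]
    by_cases h : p = v + 1
    · have hk : pvKey (k, v) = pvKey (k + 1, p) := by simp only [pvKey]; omega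
      simp only [if_pos hk, if_pos h]
      obtain ⟨h1, h2⟩ := ih (k + 1) p
      refine ⟨?_, ?_⟩
      · simp only [List.getLastD_cons] at h1 ⊢
        subst h; exact h1
      · subst h; exact h2
    · have hk : ¬ pvKey (k, v) = pvKey (k + 1, p) := by simp only [pvKey]; omega
      simp only [if_neg hk, if_neg h]
      obtain ⟨h1, h2⟩ := ih (k + 1) p
      refine ⟨by simp, ?_⟩
      simp only [List.map_cons, h2]
      congr 1
      simp only [pvFmtGroup, pvFmtPair, List.headI]
      rw [h1]

-- ===== VERDICT (by name: the statement is the Claim_ definition above) =====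
theorem build_page_ranges_spec : Claim_equal_build_page_ranges := by
  intro pages _
  unfold Spec_build_page_ranges build_page_ranges build_page_ranges_alt
  match pages with
  | [] => simp [pvGroups, PySem.List.enumerate_nil, PySem.Str.join, PySem.Chars.join, List.intercalate]
  | p0 :: rest =>
    simp only
    rw [show PySem.List.enumerate (p0 :: rest) = (0, p0) :: PySem.List.enumerate rest (0 + 1) from
      PySem.List.enumerate_cons ..]
    obtain ⟨h1, h2⟩ := gb_seg rest 0 p0
    have hB : (pvGroups ((0, p0) :: PySem.List.enumerate rest (0 + 1))).map pvFmtGroup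
        = ((p0, (pvSeg0 p0 rest).1) :: (pvSeg0 p0 rest).2).map pvFmtPair := by
      simp only [pvGroups, List.map_cons, h2]
      congr 1
      simp only [pvFmtGroup, pvFmtPair, List.headI]
      rw [h1]
    by_cases hr : rest = []
    · subst hr
      simp [pvGroups, pvGb, PySem.List.enumerate_nil, pvFmtGroup, PySem.Str.join,
        PySem.Chars.join_singleton]
      rw [← PySem.Int.toList_toStr]
      exact (String.ofList_toList).symm
    · simp only [if_neg hr]
      rw [foldA_seg rest [] p0 p0, hB]
      simp
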